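-- pv_equiv track=rewrite | github.com/Weronciak/Fugue | Fugue_1.py | Skrot_Dlugosc
-- ===== SOURCE A (Python) =====
-- def Skrot_Dlugosc(skrot, dlugosc_skrotu, w_skracania):
--     # moj skrot to najstarsze bajty:
--     if(int(w_skracania) == 1):
--         # przesuniecie bitowe w prawo >> (32 - dlugosc_skrotu) * 8
--         skrot = skrot >> ((32 - int(dlugosc_skrotu)) * 8)
--     else:
--         # moj skrot do najmlodsze bajty
--         i = 1
--         mnoznik = 0xff
--         while(i < int(dlugosc_skrotu)):
--             # przesuniecie bitowe w lewo (dodanie 8 bitow 0)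
--             mnoznik = mnoznik << 8
--             # dopisanie na koncu mnoznika (8 ostatnich bitow) wartosc ff czyli 11111111
--             mnoznik = mnoznik | 0xff
--             i = i + 1
--         skrot = skrot & mnoznik
--     return skrot
-- ===== SOURCE B (Python) =====
-- def Skrot_Dlugosc(skrot, dlugosc_skrotu, w_skracania):
--     if int(w_skracania) == 1:
--         return skrot >> ((32 - int(dlugosc_skrotu)) * 8)
--     n = int(dlugosc_skrotu)
--     # closed-form mask of max(n,1) low bytes (the loop yields one byte for n <= 1)
--     return skrot & ((1 << (8 * max(n, 1))) - 1)
-- ===== Notes on version B (the rewrite author's own statement) =====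
-- stated objective: simpler
-- what changed: Replaces the byte-by-byte while-loop that builds the low-byte mask with the single closed-form mask (1 << (8*max(n,1))) - 1 (clamped to one byte exactly as the loop's zero-iteration case gives 0xff); the shift branch is unchanged.
import Mathlib
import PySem

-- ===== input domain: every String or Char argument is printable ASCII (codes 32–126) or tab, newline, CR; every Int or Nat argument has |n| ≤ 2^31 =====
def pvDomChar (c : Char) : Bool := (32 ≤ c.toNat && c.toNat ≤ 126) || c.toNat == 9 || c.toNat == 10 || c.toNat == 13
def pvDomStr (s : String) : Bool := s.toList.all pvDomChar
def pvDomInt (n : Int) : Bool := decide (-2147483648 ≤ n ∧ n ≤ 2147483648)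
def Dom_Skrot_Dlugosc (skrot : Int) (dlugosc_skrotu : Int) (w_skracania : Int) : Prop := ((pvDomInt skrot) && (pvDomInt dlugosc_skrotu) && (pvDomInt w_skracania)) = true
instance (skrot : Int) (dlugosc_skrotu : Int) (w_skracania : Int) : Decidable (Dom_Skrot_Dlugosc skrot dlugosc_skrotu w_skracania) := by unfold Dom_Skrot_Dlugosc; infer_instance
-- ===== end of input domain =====

-- ===== PORT A =====
-- B replaces A's byte-by-byte mask-building loop by one closed-form mask (objective: simpler).
-- while(i < n): mnoznik = (mnoznik << 8) | 0xff; i += 1  — runs (n-1).toNat times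
def pvMaskLoop : Nat → Int → Int
  | 0, mnoznik => mnoznik
  | Nat.succ k, mnoznik => pvMaskLoop k (PySem.Int.bor (mnoznik <<< (8 : Nat)) 255)

def Skrot_Dlugosc (skrot : Int) (dlugosc_skrotu : Int) (w_skracania : Int) : Int :=
  if w_skracania = 1 then
    -- Python raises ValueError on a negative shift; Pre_ gives (32 - dlugosc_skrotu) * 8 ≥ 0, so .toNat is exact
    skrot >>> ((32 - dlugosc_skrotu) * 8).toNat
  else
    PySem.Int.band skrot (pvMaskLoop (dlugosc_skrotu - 1).toNat 255)

-- ===== PORT B =====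
def Skrot_Dlugosc_alt (skrot : Int) (dlugosc_skrotu : Int) (w_skracania : Int) : Int :=
  if w_skracania = 1 then
    skrot >>> ((32 - dlugosc_skrotu) * 8).toNat
  else
    PySem.Int.band skrot ((1 <<< (8 * max dlugosc_skrotu 1).toNat) - 1)

-- ===== PRECONDITION & SPEC =====
-- Pre_ excludes exactly the inputs where Python A raises ValueError (negative shift count):
-- w_skracania == 1 together with dlugosc_skrotu > 32.
def Pre_Skrot_Dlugosc (skrot : Int) (dlugosc_skrotu : Int) (w_skracania : Int) : Prop :=
  w_skracania = 1 → dlugosc_skrotu ≤ 32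
instance (skrot : Int) (dlugosc_skrotu : Int) (w_skracania : Int) : Decidable (Pre_Skrot_Dlugosc skrot dlugosc_skrotu w_skracania) := by unfold Pre_Skrot_Dlugosc; infer_instance

def pvWitness_Skrot_Dlugosc : Int × Int × Int := (123456789, 4, 0)

def Spec_Skrot_Dlugosc (skrot : Int) (dlugosc_skrotu : Int) (w_skracania : Int) (out : Int) : Prop := out = Skrot_Dlugosc_alt skrot dlugosc_skrotu w_skracania
instance (skrot : Int) (dlugosc_skrotu : Int) (w_skracania : Int) (out : Int) : Decidable (Spec_Skrot_Dlugosc skrot dlugosc_skrotu w_skracania out) := by unfold Spec_Skrot_Dlugosc; infer_instance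

-- ===== CLAIM (what is proved, stated in full; the proofs are below) =====
def Claim_equal_Skrot_Dlugosc : Prop := ∀ (skrot : Int) (dlugosc_skrotu : Int) (w_skracania : Int), Dom_Skrot_Dlugosc skrot dlugosc_skrotu w_skracania → Pre_Skrot_Dlugosc skrot dlugosc_skrotu w_skracania → Spec_Skrot_Dlugosc skrot dlugosc_skrotu w_skracania (Skrot_Dlugosc skrot dlugosc_skrotu w_skracania)

-- ===== LEMMAS AND PROOFS =====

-- the loop's step: one more byte of ones
theorem pv_step (j : Nat) (hj : 1 ≤ j) :
    PySem.Int.bor ((((2 ^ (8 * j) - 1 : Nat) : Int)) <<< (8 : Nat)) 255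
      = (((2 ^ (8 * (j + 1)) - 1 : Nat) : Int)) := by
  have hc : (((2 ^ (8 * j) - 1 : Nat) : Int)) <<< (8 : Nat)
      = (((2 ^ (8 * j) - 1) <<< 8 : Nat) : Int) := Int.mem_toNat?.mp rfl
  rw [hc]
  have h255 : (255 : Int) = ((255 : Nat) : Int) := rfl
  rw [h255, PySem.Int.bor_natCast]
  congr 1
  apply Nat.eq_of_testBit_eq
  intro i
  rw [Nat.testBit_lor, Nat.testBit_shiftLeft]
  have h1 : Nat.testBit (2 ^ (8 * j) - 1) (i - 8) = decide (i - 8 < 8 * j) :=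
    Nat.testBit_two_pow_sub_one _ _
  have h2 : Nat.testBit 255 i = decide (i < 8) := Nat.testBit_two_pow_sub_one 8 i
  have h3 : Nat.testBit (2 ^ (8 * (j + 1)) - 1) i = decide (i < 8 * (j + 1)) :=
    Nat.testBit_two_pow_sub_one _ _
  rw [h1, h2, h3, ← Bool.decide_and, ← Bool.decide_or]
  exact decide_eq_decide.mpr (by omega)

-- the loop invariant: starting from a j-byte mask, k iterations give a (j+k)-byte mask
theorem pv_maskLoop_eq (k : Nat) : ∀ (j : Nat), 1 ≤ j →
    pvMaskLoop k (((2 ^ (8 * j) - 1 : Nat) : Int)) = (((2 ^ (8 * (j + k)) - 1 : Nat) : Int)) := by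
  induction k with
  | zero => intro j hj; simp [pvMaskLoop]
  | succ k ih =>
    intro j hj
    rw [pvMaskLoop, pv_step j hj, ih (j + 1) (by omega)]
    have h : j + 1 + k = j + (k + 1) := by omega
    rw [h]

-- B's closed-form mask is the same number
theorem pv_alt_mask (n : Int) :
    (1 <<< (8 * max n 1).toNat : Int) - 1 = (((2 ^ (8 * ((n - 1).toNat + 1)) - 1 : Nat) : Int)) := by
  rw [Nat.one_shiftLeft]
  have he : (8 * max n 1).toNat = 8 * ((n - 1).toNat + 1) := by omega
  rw [he]
  have hpos : 1 ≤ 2 ^ (8 * ((n - 1).toNat + 1)) := Nat.one_le_two_pow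
  push_cast [Nat.cast_sub hpos]
  ring

-- ===== VERDICT (by name: the statement is the Claim_ definition above) =====
theorem Skrot_Dlugosc_spec : Claim_equal_Skrot_Dlugosc := by
  intro skrot n w _ _
  unfold Spec_Skrot_Dlugosc Skrot_Dlugosc Skrot_Dlugosc_alt
  by_cases hw : w = 1
  · simp [hw]
  · simp only [hw, if_false]
    rw [pv_alt_mask n]
    have h255 : (255 : Int) = (((2 ^ (8 * 1) - 1 : Nat) : Int)) := rfl
    rw [h255, pv_maskLoop_eq ((n - 1).toNat) 1 (by omega)]
    have h : 1 + (n - 1).toNat = (n - 1).toNat + 1 := by omega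
    rw [h]
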